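-- pv_equiv track=rewrite | github.com/Zachanardo/Intellicrack | intellicrack/core/analysis/rop_generator.py | _calculate_chain_complexity
-- ===== SOURCE A (Python) =====
-- from typing import Any
--
-- def _calculate_chain_complexity(chain_gadgets: list[dict[str, Any]]) -> int:
--     """Calculate a complexity score for the ROP chain."""
--     complexity = 0
--
--     for gadget in chain_gadgets:
--         gadget_type = gadget.get("type", "")
--         if gadget_type == "pop_reg":
--             complexity += 1
--         elif gadget_type in ["mov_reg_reg", "arith_reg"]:
--             complexity += 2
--         elif gadget_type in ["call_reg", "jmp_reg"]:
--             complexity += 3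
--         else:
--             complexity += 1
--
--     return complexity
-- ===== SOURCE B (Python) =====
-- _WEIGHTS = {"mov_reg_reg": 2, "arith_reg": 2, "call_reg": 3, "jmp_reg": 3}
--
--
-- def _calculate_chain_complexity(chain_gadgets):
--     """Frequency-table version: count gadget types once, then sum count * weight."""
--     counts = {}
--     for gadget in chain_gadgets:
--         t = gadget.get("type", "")
--         counts[t] = counts.get(t, 0) + 1
--     total = 0
--     for t, n in counts.items():
--         total += n * _WEIGHTS.get(t, 1)
--     return total
-- ===== Notes on version B (the rewrite author's own statement) =====
-- stated objective: alternative
-- what changed: Replaces the per-gadget if/elif weight accumulation by building a frequency table of gadget types in one pass and then summing count * weight over the distinct types via a weight dictionary.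
import Mathlib
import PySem

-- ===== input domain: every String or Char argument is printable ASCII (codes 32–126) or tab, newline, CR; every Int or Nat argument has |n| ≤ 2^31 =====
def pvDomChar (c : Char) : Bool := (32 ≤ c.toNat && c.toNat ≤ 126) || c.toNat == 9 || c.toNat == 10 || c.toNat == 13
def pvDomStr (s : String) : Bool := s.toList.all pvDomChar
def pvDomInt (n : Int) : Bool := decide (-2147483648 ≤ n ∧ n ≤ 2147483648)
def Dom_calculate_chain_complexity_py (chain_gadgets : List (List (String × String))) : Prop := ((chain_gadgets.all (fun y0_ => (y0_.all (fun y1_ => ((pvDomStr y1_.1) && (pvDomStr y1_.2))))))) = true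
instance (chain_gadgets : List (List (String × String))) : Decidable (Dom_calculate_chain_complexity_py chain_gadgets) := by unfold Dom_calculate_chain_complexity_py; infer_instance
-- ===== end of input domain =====

-- B replaces the per-gadget if/elif accumulation with a frequency table of gadget types plus a weighted sum over distinct types (alternative decomposition, same cost).
-- ===== PORT A =====
def calculate_chain_complexity_py (chain_gadgets : List (List (String × String))) : Int :=
  chain_gadgets.foldl (fun complexity gadget =>
    let gadget_type := (PySem.Dict.ofList gadget).getD "type" ""
    if gadget_type = "pop_reg" then complexity + 1
    else if gadget_type ∈ ["mov_reg_reg", "arith_reg"] then complexity + 2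
    else if gadget_type ∈ ["call_reg", "jmp_reg"] then complexity + 3
    else complexity + 1) 0

-- ===== PORT B =====
def pvWeights : PySem.Dict String Int :=
  PySem.Dict.ofList [("mov_reg_reg", 2), ("arith_reg", 2), ("call_reg", 3), ("jmp_reg", 3)]

def calculate_chain_complexity_py_alt (chain_gadgets : List (List (String × String))) : Int :=
  let counts := chain_gadgets.foldl (fun d gadget =>
    let t := (PySem.Dict.ofList gadget).getD "type" ""
    d.insert t (d.getD t 0 + 1)) PySem.Dict.empty
  counts.items.foldl (fun total p => total + p.2 * (pvWeights.getD p.1 1)) 0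

-- ===== PRECONDITION & SPEC =====
def Spec_calculate_chain_complexity_py (chain_gadgets : List (List (String × String))) (out : Int) : Prop := out = calculate_chain_complexity_py_alt chain_gadgets
instance (chain_gadgets : List (List (String × String))) (out : Int) : Decidable (Spec_calculate_chain_complexity_py chain_gadgets out) := by unfold Spec_calculate_chain_complexity_py; infer_instance

-- ===== CLAIM (what is proved, stated in full; the proofs are below) =====
def Claim_equal_calculate_chain_complexity_py : Prop := ∀ (chain_gadgets : List (List (String × String))), Dom_calculate_chain_complexity_py chain_gadgets → Spec_calculate_chain_complexity_py chain_gadgets (calculate_chain_complexity_py chain_gadgets)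

-- ===== LEMMAS AND PROOFS =====

-- A's per-gadget weight as a function
def pvWA (t : String) : Int :=
  if t = "pop_reg" then 1
  else if t ∈ ["mov_reg_reg", "arith_reg"] then 2
  else if t ∈ ["call_reg", "jmp_reg"] then 3
  else 1

theorem pvWA_eq_weights (t : String) : pvWA t = pvWeights.getD t 1 := by
  unfold pvWA pvWeights
  simp only [PySem.Dict.ofList, PySem.Dict.update, List.foldl_cons, List.foldl_nil,
    PySem.Dict.getD_insert, PySem.Dict.getD_empty, List.mem_cons,
    List.not_mem_nil, or_false]
  split_ifs <;> simp_all

theorem pvFoldl_add_map {α : Type} (l : List α) (f : α → Int) (a : Int) :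
    l.foldl (fun acc x => acc + f x) a = a + (l.map f).sum := by
  induction l generalizing a with
  | nil => simp
  | cons x xs ih => simp [List.foldl_cons, ih (a + f x)]; ring

theorem pvCountSum (xs : List String) (w : String → Int) :
    ((PySem.Set.ofList xs).map (fun k => (xs.count k : Int) * w k)).sum = (xs.map w).sum := by
  have hperm : (PySem.Set.ofList xs).Perm xs.dedup := by
    rw [List.perm_ext_iff_of_nodup (PySem.Set.nodup_ofList (xs := xs)) xs.nodup_dedup]
    intro a; simp [PySem.Set.mem_ofList]
  have h1 : ((PySem.Set.ofList xs).map (fun k => (xs.count k : Int) * w k)).sum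
      = ((xs.dedup).map (fun k => (xs.count k : Int) * w k)).sum :=
    (hperm.map _).sum_eq
  rw [h1, Finset.sum_list_map_count xs w]
  have hfin : xs.dedup.toFinset = xs.toFinset := List.toFinset.ext_iff.2 (by simp)
  rw [← hfin, List.sum_toFinset _ xs.nodup_dedup]
  simp

-- ===== VERDICT (by name: the statement is the Claim_ definition above) =====
theorem calculate_chain_complexity_py_spec : Claim_equal_calculate_chain_complexity_py := by
  intro cg _
  unfold Spec_calculate_chain_complexity_py calculate_chain_complexity_py calculate_chain_complexity_py_alt
  -- A as a sum of weights
  have hA : cg.foldl (fun complexity gadget =>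
      let gadget_type := (PySem.Dict.ofList gadget).getD "type" ""
      if gadget_type = "pop_reg" then complexity + 1
      else if gadget_type ∈ ["mov_reg_reg", "arith_reg"] then complexity + 2
      else if gadget_type ∈ ["call_reg", "jmp_reg"] then complexity + 3
      else complexity + 1) 0
      = (cg.map (fun g => pvWA ((PySem.Dict.ofList g).getD "type" ""))).sum := by
    have : (fun (complexity : Int) (gadget : List (String × String)) =>
        let gadget_type := (PySem.Dict.ofList gadget).getD "type" ""
        if gadget_type = "pop_reg" then complexity + 1
        else if gadget_type ∈ ["mov_reg_reg", "arith_reg"] then complexity + 2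
        else if gadget_type ∈ ["call_reg", "jmp_reg"] then complexity + 3
        else complexity + 1)
        = (fun complexity gadget => complexity + pvWA ((PySem.Dict.ofList gadget).getD "type" "")) := by
      funext c g; unfold pvWA; dsimp only; split_ifs <;> rfl
    rw [this, pvFoldl_add_map]; ring
  -- B's counting loop is Counter over the mapped types
  have hcnt : cg.foldl (fun d gadget =>
      let t := (PySem.Dict.ofList gadget).getD "type" ""
      d.insert t (d.getD t 0 + 1)) PySem.Dict.empty
      = PySem.Dict.counter (cg.map (fun g => (PySem.Dict.ofList g).getD "type" "")) := by
    rw [← PySem.Dict.foldl_insert_getD_add_one_eq_counter, List.foldl_map]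
  rw [hA]
  rw [hcnt]
  simp only [PySem.Dict.items_counter, pvFoldl_add_map, List.map_map, zero_add]
  have : ((fun (p : String × Int) => p.2 * pvWeights.getD p.1 1) ∘
      fun k => (k, ((cg.map (fun g => (PySem.Dict.ofList g).getD "type" "")).count k : Int)))
      = fun k => ((cg.map (fun g => (PySem.Dict.ofList g).getD "type" "")).count k : Int)
          * pvWeights.getD k 1 := rfl
  rw [this]
  have := pvCountSum (cg.map (fun g => (PySem.Dict.ofList g).getD "type" "")) (fun t => pvWeights.getD t 1)
  rw [this]
  simp only [List.map_map]
  have : ((fun t => pvWeights.getD t 1) ∘ fun g => (PySem.Dict.ofList g).getD "type" "")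
      = fun g => pvWeights.getD ((PySem.Dict.ofList g).getD "type" "") 1 := rfl
  rw [this]
  congr 1
  exact List.map_congr_left (fun g _ => pvWA_eq_weights _)
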